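-- pv_equiv track=rewrite | github.com/Robeenx/tasks | randomes/strings/string_suffix.py | string_suffix
-- ===== SOURCE A (Python) =====
-- def string_suffix(s: str) -> int:
--     """
--     Сумма сходств строки.
--     """
--     res = 0
--     for i in range(len(s)):
--         for x in range(len(s), i, -1):
--             if s.startswith(s[i:x]):
--                 res += len(s[i:x])
--                 break
--     return res
-- ===== SOURCE B (Python) =====
-- def string_suffix(s: str) -> int:
--     """
--     Сумма сходств строки.
--     """
--     total = 0
--     for i in range(len(s)):
--         k = 0
--         for a, b in zip(s, s[i:]):
--             if a != b:
--                 break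
--             k += 1
--         total += k
--     return total
-- ===== Notes on version B (the rewrite author's own statement) =====
-- stated objective: faster
-- what changed: A searches, for each start i, the longest prefix-matching slice by trying every end x downward with a full startswith test on a fresh slice; B computes the same longest match length directly as the character-by-character common prefix of s and s[i:], removing the inner search over x and its O(n) slice+startswith test.
import Mathlib
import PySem

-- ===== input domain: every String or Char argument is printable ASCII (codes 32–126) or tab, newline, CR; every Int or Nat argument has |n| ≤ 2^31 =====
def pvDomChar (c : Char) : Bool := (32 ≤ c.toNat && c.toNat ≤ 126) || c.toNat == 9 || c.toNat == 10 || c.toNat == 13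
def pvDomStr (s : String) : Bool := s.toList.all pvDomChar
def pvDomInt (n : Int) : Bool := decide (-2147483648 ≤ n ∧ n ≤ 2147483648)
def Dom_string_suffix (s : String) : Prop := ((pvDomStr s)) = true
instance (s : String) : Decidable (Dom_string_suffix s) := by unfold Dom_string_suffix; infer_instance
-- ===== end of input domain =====

-- B replaces A's inner downward search with slices by a direct char-by-char common-prefix count (objective: faster).

-- ===== PORT A =====
-- inner loop 'for x in range(len(s), i, -1): if s.startswith(s[i:x]): res += len(s[i:x]); break'
-- transliterated as a recursion over the list of x values, returning the amount added to res (0 if no break)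
def pvInnerA (cs : List Char) (i : Int) : List Int → Int
  | [] => 0
  | x :: rest =>
      let sub := PySem.List.slice cs (some i) (some x)
      if PySem.Chars.startswith cs sub then (sub.length : Int)
      else pvInnerA cs i rest

def string_suffix (s : String) : Int :=
  let cs := s.toList
  (PySem.List.pyRange 0 (cs.length : Int) 1).foldl
    (fun res i => res + pvInnerA cs i (PySem.List.pyRange (cs.length : Int) i (-1))) 0

-- ===== PORT B =====
-- inner loop 'for a, b in zip(s, s[i:]): if a != b: break; k += 1' as structural recursion over the zipped pairs
def pvLcpPairs : List (Char × Char) → Int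
  | [] => 0
  | (a, b) :: rest => if a ≠ b then 0 else pvLcpPairs rest + 1

def string_suffix_alt (s : String) : Int :=
  let cs := s.toList
  (PySem.List.pyRange 0 (cs.length : Int) 1).foldl
    (fun total i => total + pvLcpPairs (cs.zip (PySem.List.slice cs (some i) none))) 0

-- ===== PRECONDITION & SPEC =====
def Spec_string_suffix (s : String) (out : Int) : Prop := out = string_suffix_alt s
instance (s : String) (out : Int) : Decidable (Spec_string_suffix s out) := by unfold Spec_string_suffix; infer_instance

-- ===== CLAIM =====
def Claim_equal_string_suffix : Prop := ∀ (s : String), Dom_string_suffix s → Spec_string_suffix s (string_suffix s)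

-- ===== LEMMAS AND PROOFS =====
-- Nat-valued common-prefix length, the shared characterisation of both inner loops
def lcpN : List Char → List Char → Nat
  | a :: as, b :: bs => if a = b then lcpN as bs + 1 else 0
  | _, _ => 0

theorem lcpN_le (u v : List Char) : lcpN u v ≤ v.length := by
  induction u generalizing v with
  | nil => cases v <;> simp [lcpN]
  | cons a as ih =>
      cases v with
      | nil => simp [lcpN]
      | cons b bs =>
          simp only [lcpN]
          split_ifs
          · simpa using ih bs
          · simp

theorem pvLcpPairs_zip (u v : List Char) : pvLcpPairs (u.zip v) = (lcpN u v : Int) := by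
  induction u generalizing v with
  | nil => cases v <;> simp [pvLcpPairs, lcpN]
  | cons a as ih =>
      cases v with
      | nil => simp [pvLcpPairs, lcpN]
      | cons b bs =>
          simp only [List.zip_cons_cons, pvLcpPairs, lcpN, ih bs]
          by_cases h : a = b
          · simp only [h, ite_not]
            push_cast
            ring_nf
          · simp [h]

theorem take_prefix_iff (k : Nat) (u v : List Char) (hk : k ≤ v.length) :
    (v.take k <+: u) ↔ k ≤ lcpN u v := by
  induction k generalizing u v with
  | zero => simp
  | succ k ih =>
      cases v with
      | nil => simp at hk
      | cons b bs =>
          cases u with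
          | nil =>
              simp only [List.take_succ_cons, lcpN]
              constructor
              · intro h; exact absurd (List.eq_nil_of_prefix_nil h) (by simp)
              · intro h; omega
          | cons a as =>
              simp only [List.take_succ_cons, List.cons_prefix_cons, lcpN]
              rcases eq_or_ne a b with h | h
              · subst h
                simp [ih as bs (by simpa using hk)]
              · simp [Ne.symm h, h]

theorem pyRange_self_neg_one (a : Int) : PySem.List.pyRange a a (-1) = [] := by
  simp [PySem.List.pyRange]

theorem pyRange_neg_one_cons {a b : Int} (h : b < a) :
    PySem.List.pyRange a b (-1) = a :: PySem.List.pyRange (a - 1) b (-1) := by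
  have hc : (a - b + -(-1) - 1) / -(-1) = a - b := by norm_num
  simp only [PySem.List.pyRange]
  norm_num [h]
  rcases eq_or_lt_of_le (Int.add_one_le_iff.mpr h) with h1 | h1
  · -- b = a - 1 : both tails empty
    have : a - b = 1 := by omega
    have h2 : ¬ b < a - 1 := by omega
    simp [this, h2, List.range_succ]
  · have h2 : b < a - 1 := by omega
    simp only [if_pos h2]
    have hn : (a - b).toNat = (a - 1 - b).toNat + 1 := by omega
    rw [hn, List.range_succ_eq_map, List.map_cons, List.map_map]
    congr 1
    · norm_num
    · apply List.map_congr_left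
      intro k _
      simp only [Function.comp_apply]
      push_cast
      ring

theorem innerA_eq (cs : List Char) (i d : Nat) (hx : i + d ≤ cs.length) :
    pvInnerA cs (i : Int) (PySem.List.pyRange ((i : Int) + d) i (-1)) =
      (min (lcpN cs (cs.drop i)) d : Int) := by
  induction d with
  | zero =>
      have : (i : Int) + (0 : Nat) = (i : Int) := by push_cast; ring
      rw [this, pyRange_self_neg_one]
      simp [pvInnerA]
  | succ d ih =>
      rw [pyRange_neg_one_cons (by omega)]
      simp only [pvInnerA]
      have hslice : PySem.List.slice cs (some (i : Int)) (some ((i : Int) + (d + 1 : Nat))) =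
          (cs.drop i).take (d + 1) := by
        have := PySem.List.slice_natCast cs i (i + (d + 1))
        push_cast at this ⊢
        rw [this]
        congr 1
        omega
      rw [hslice]
      have hpre : PySem.Chars.startswith cs ((cs.drop i).take (d + 1)) =
          decide (d + 1 ≤ lcpN cs (cs.drop i)) := by
        simp only [PySem.Chars.startswith]
        rw [Bool.eq_iff_iff]
        simp only [List.isPrefixOf_iff_prefix, decide_eq_true_eq]
        exact take_prefix_iff (d + 1) cs (cs.drop i) (by simp; omega)
      rw [hpre]
      by_cases h : d + 1 ≤ lcpN cs (cs.drop i)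
      · simp only [h, decide_true, if_true]
        have hlen : ((cs.drop i).take (d + 1)).length = d + 1 := by
          simp; omega
        rw [hlen]
        have hm : min (lcpN cs (cs.drop i)) (d + 1) = d + 1 := by omega
        rw [← Nat.cast_min, hm]
      · simp only [h, decide_false]
        rw [if_neg (by simp)]
        have harg : (i : Int) + (d + 1 : Nat) - 1 = (i : Int) + d := by push_cast; ring
        rw [harg, ih (by omega)]
        have hm : min (lcpN cs (cs.drop i)) d = min (lcpN cs (cs.drop i)) (d + 1) := by omega
        rw [← Nat.cast_min, ← Nat.cast_min, hm]

-- ===== VERDICT =====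
theorem string_suffix_spec : Claim_equal_string_suffix := by
  intro s _
  unfold Spec_string_suffix string_suffix string_suffix_alt
  simp only []
  apply PySem.List.foldl_congr_mem
  intro acc x hx
  rw [PySem.List.mem_pyRange_one] at hx
  obtain ⟨h0, h1⟩ := hx
  set cs := s.toList with hcs
  obtain ⟨iN, rfl⟩ : ∃ iN : Nat, x = (iN : Int) := ⟨x.toNat, by omega⟩
  have hiN : iN ≤ cs.length := by exact_mod_cast le_of_lt (by exact_mod_cast h1)
  have hrng : (cs.length : Int) = (iN : Int) + ((cs.length - iN : Nat) : Int) := by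
    omega
  rw [hrng, innerA_eq cs iN (cs.length - iN) (by omega),
      PySem.List.slice_from cs (by positivity), pvLcpPairs_zip]
  have : (iN : Int).toNat = iN := by simp
  rw [this]
  have hmin : min (lcpN cs (cs.drop iN)) (cs.length - iN) = lcpN cs (cs.drop iN) := by
    have := lcpN_le cs (cs.drop iN)
    simp at this
    omega
  rw [← Nat.cast_min, hmin]
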